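-- pv_equiv track=rewrite | github.com/psi-oss/get-physics-done | src/gpd/adapters/install_utils.py | _leading_top_level_section_end
-- ===== SOURCE A (Python) =====
-- def _leading_top_level_section_end(text: str) -> int:
--     """Return the character offset that ends the first top-level section in *text*."""
--
--     lines = text.splitlines(keepends=True)
--     if not lines:
--         return 0
--
--     in_fence = False
--     offset = len(text)
--     for index, line in enumerate(lines[1:], start=1):
--         stripped = line.lstrip()
--         if stripped.startswith("```") or stripped.startswith("~~~"):
--             in_fence = not in_fence
--             continue
--         if in_fence:
--             continue
--         if line.startswith("## "):
--             offset = sum(len(entry) for entry in lines[:index])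
--             break
--     return offset
-- ===== SOURCE B (Python) =====
-- def _leading_top_level_section_end(text: str) -> int:
--     """Return the character offset that ends the first top-level section in *text*."""
--
--     n = len(text)
--
--     def next_line_start(i: int) -> int:
--         while i < n and text[i] != "\n" and text[i] != "\r":
--             i += 1
--         if i < n:
--             i += 2 if text[i] == "\r" and text.startswith("\n", i + 1) else 1
--         return i
--
--     i = next_line_start(0)  # skip the first line
--     in_fence = False
--     while i < n:
--         start = i
--         k = i
--         while k < n and (text[k] == " " or text[k] == "\t"):
--             k += 1
--         if text.startswith("```", k) or text.startswith("~~~", k):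
--             in_fence = not in_fence
--         elif not in_fence and text.startswith("## ", start):
--             return start
--         i = next_line_start(i)
--     return n
-- ===== Notes on version B (the rewrite author's own statement) =====
-- stated objective: alternative
-- what changed: B scans the string character-by-character with index arithmetic (a next_line_start helper, an in-line whitespace skip and positional str.startswith checks), never calling splitlines or materializing a line list, and returns the matching line-start offset directly; A builds the keepends line list, enumerates it and recomputes a prefix sum over lines[:index] at the match.
import Mathlib
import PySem

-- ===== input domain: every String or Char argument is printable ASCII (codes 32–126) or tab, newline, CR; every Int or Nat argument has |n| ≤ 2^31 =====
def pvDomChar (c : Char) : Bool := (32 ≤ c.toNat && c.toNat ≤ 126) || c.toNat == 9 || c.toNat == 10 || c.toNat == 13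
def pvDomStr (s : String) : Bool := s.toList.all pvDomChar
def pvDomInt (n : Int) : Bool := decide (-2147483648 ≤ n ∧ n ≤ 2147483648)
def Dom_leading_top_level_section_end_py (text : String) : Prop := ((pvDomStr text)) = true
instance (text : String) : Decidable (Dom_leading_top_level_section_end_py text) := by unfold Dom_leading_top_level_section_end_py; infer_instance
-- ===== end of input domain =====

-- B scans the string character-by-character with index arithmetic (no splitlines, no line
-- list), returning the matching line-start offset directly; A builds the keepends line list
-- and recomputes a prefix sum at the match. Same O(n) cost, different data traversal.


-- ===== PORT A =====
-- str.splitlines(keepends=True), hand-ported (PySem only has the keepends=False form).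
-- Exact on all inputs whose only line-break characters are '\n', '\r' and "\r\n" — in
-- particular on the whole ASCII domain Dom_ (codes 32–126, tab, '\n', '\r').
def pvSplitKeepGo : List Char → List Char → List (List Char)
  | [], acc => if acc = [] then [] else [acc.reverse]
  | '\r' :: '\n' :: rest, acc => (acc.reverse ++ ['\r', '\n']) :: pvSplitKeepGo rest []
  | '\r' :: rest, acc => (acc.reverse ++ ['\r']) :: pvSplitKeepGo rest []
  | '\n' :: rest, acc => (acc.reverse ++ ['\n']) :: pvSplitKeepGo rest []
  | c :: rest, acc => pvSplitKeepGo rest (c :: acc)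

def pvSplitKeep (s : List Char) : List (List Char) := pvSplitKeepGo s []

-- the for-loop of A over enumerate(lines[1:], start=1); `lines` is carried for the break branch
def pvLoopA : List (Int × List Char) → List (List Char) → Bool → Int → Int
  | [], _, _, offset => offset
  | (index, line) :: rest, lines, in_fence, offset =>
    let stripped := PySem.Chars.lstrip line
    if PySem.Chars.startswith stripped ['`','`','`'] || PySem.Chars.startswith stripped ['~','~','~'] then
      pvLoopA rest lines (!in_fence) offset
    else if in_fence then
      pvLoopA rest lines in_fence offset
    else if PySem.Chars.startswith line ['#','#',' '] then
      -- offset = sum(len(entry) for entry in lines[:index]); break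
      (PySem.List.slice lines none (some index)).foldl (fun a e => a + (e.length : Int)) 0
    else
      pvLoopA rest lines in_fence offset

def leading_top_level_section_end_py (text : String) : Int :=
  let lines := pvSplitKeep text.toList
  if lines = [] then 0
  else
    pvLoopA (PySem.List.enumerate (PySem.List.slice lines (some 1) none) 1) lines false
      (PySem.Str.len text)

-- ===== PORT B =====
-- B works on the character sequence directly; indices are Nat (Python's are the same
-- non-negative ints). text.startswith(pat, k) is ported as startswith on the k-suffix.

-- the inner 'while i < n and text[i] != "\n" and text[i] != "\r"' of next_line_start
def pvScanToBreak (cs : List Char) (i : Nat) : Nat :=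
  if h : i < cs.length then
    if cs[i] = '\n' ∨ cs[i] = '\r' then i else pvScanToBreak cs (i + 1)
  else i
termination_by cs.length - i

-- the trailing 'if i < n: i += 2 if ... else 1' of next_line_start
def pvSkipBreak (cs : List Char) (i : Nat) : Nat :=
  if i < cs.length then
    if cs[i]? = some '\r' ∧ cs[i + 1]? = some '\n' then i + 2 else i + 1
  else i

-- 'while k < n and (text[k] == " " or text[k] == "\t")'
def pvSkipWS (cs : List Char) (i : Nat) : Nat :=
  if h : i < cs.length then
    if cs[i] = ' ' ∨ cs[i] = '\t' then pvSkipWS cs (i + 1) else i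
  else i
termination_by cs.length - i

-- text.startswith(pat, k)
def pvStartsAt (cs : List Char) (k : Nat) (pat : List Char) : Bool :=
  PySem.Chars.startswith (cs.drop k) pat

theorem pvScanToBreak_le (cs : List Char) (i : Nat) : i ≤ pvScanToBreak cs i := by
  fun_induction pvScanToBreak cs i <;> omega

theorem pvNextLine_gt (cs : List Char) (i : Nat) (h : i < cs.length) :
    i < pvSkipBreak cs (pvScanToBreak cs i) := by
  have h1 := pvScanToBreak_le cs i
  unfold pvSkipBreak
  split <;> [skip; omega] <;> split <;> omega

-- the main 'while i < n' loop of B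
def pvLoopBChar (cs : List Char) (i : Nat) (in_fence : Bool) : Int :=
  if h : i < cs.length then
    let start := i
    let k := pvSkipWS cs i
    if pvStartsAt cs k ['`','`','`'] || pvStartsAt cs k ['~','~','~'] then
      pvLoopBChar cs (pvSkipBreak cs (pvScanToBreak cs i)) (!in_fence)
    else if !in_fence && pvStartsAt cs start ['#','#',' '] then
      (start : Int)
    else
      pvLoopBChar cs (pvSkipBreak cs (pvScanToBreak cs i)) in_fence
  else (cs.length : Int)
termination_by cs.length - i
decreasing_by all_goals (have := pvNextLine_gt cs i h; omega)

def leading_top_level_section_end_py_alt (text : String) : Int :=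
  let cs := text.toList
  pvLoopBChar cs (pvSkipBreak cs (pvScanToBreak cs 0)) false

-- ===== PRECONDITION & SPEC =====
def Spec_leading_top_level_section_end_py (text : String) (out : Int) : Prop := out = leading_top_level_section_end_py_alt text
instance (text : String) (out : Int) : Decidable (Spec_leading_top_level_section_end_py text out) := by unfold Spec_leading_top_level_section_end_py; infer_instance

-- ===== CLAIM (what is proved, stated in full; the proofs are below) =====
def Claim_equal_leading_top_level_section_end_py : Prop := ∀ (text : String), Dom_leading_top_level_section_end_py text → Spec_leading_top_level_section_end_py text (leading_top_level_section_end_py text)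

-- ===== LEMMAS AND PROOFS =====

-- proof-only intermediate: A's loop re-expressed line-by-line with a running offset
def pvLoopB : List (List Char) → Bool → Int → Int
  | [], _, pos => pos
  | line :: rest, in_fence, pos =>
    if PySem.Chars.startswith (PySem.Chars.lstrip line) ['`','`','`'] || PySem.Chars.startswith (PySem.Chars.lstrip line) ['~','~','~'] then
      pvLoopB rest (!in_fence) (pos + (line.length : Int))
    else if !in_fence && PySem.Chars.startswith line ['#','#',' '] then
      pos
    else
      pvLoopB rest in_fence (pos + (line.length : Int))

def pvSumLen (ls : List (List Char)) : Int := ls.foldl (fun a e => a + (e.length : Int)) 0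

theorem pvFoldl_add (ls : List (List Char)) (a : Int) :
    ls.foldl (fun a e => a + (e.length : Int)) a = a + pvSumLen ls := by
  induction ls generalizing a with
  | nil => unfold pvSumLen; simp
  | cons x xs ih =>
    have h1 : pvSumLen (x :: xs) = (0 + (x.length : Int)) + pvSumLen xs := by
      unfold pvSumLen
      rw [List.foldl_cons, ih]
      rfl
    rw [List.foldl_cons, ih, h1]
    ring

theorem pvSumLen_cons (x : List Char) (xs : List (List Char)) :
    pvSumLen (x :: xs) = (x.length : Int) + pvSumLen xs := by
  have h := pvFoldl_add xs ((0 : Int) + (x.length : Int))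
  unfold pvSumLen
  rw [List.foldl_cons, h]
  have : pvSumLen xs = xs.foldl (fun a e => a + (e.length : Int)) 0 := rfl
  rw [← this]
  ring

theorem pvSumLen_append (xs ys : List (List Char)) :
    pvSumLen (xs ++ ys) = pvSumLen xs + pvSumLen ys := by
  induction xs with
  | nil => simp [pvSumLen]
  | cons x t ih => rw [List.cons_append, pvSumLen_cons, pvSumLen_cons, ih]; ring

theorem pvSplitKeepGo_flatten (s acc : List Char) :
    (pvSplitKeepGo s acc).flatten = acc.reverse ++ s := by
  fun_induction pvSplitKeepGo s acc <;> simp_all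

theorem pvSplitKeep_flatten (s : List Char) : (pvSplitKeep s).flatten = s := by
  simpa using pvSplitKeepGo_flatten s []

theorem pvSumLen_eq_flatten (ls : List (List Char)) :
    pvSumLen ls = (ls.flatten.length : Int) := by
  induction ls with
  | nil => simp [pvSumLen]
  | cons x xs ih => rw [pvSumLen_cons, ih]; simp

-- A's enumerate/prefix-sum loop equals the running-offset line loop
theorem pvLoop_eq (lines : List (List Char)) (tail : List (List Char)) (k : Nat)
    (htail : tail = lines.drop k) (f : Bool) (pos : Int)
    (hpos : pos = pvSumLen (lines.take k)) :
    pvLoopA (PySem.List.enumerate tail (k : Int)) lines f (pvSumLen lines)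
      = pvLoopB tail f pos := by
  induction tail generalizing k f pos with
  | nil =>
    have hk : lines.length <= k := by
      by_contra h
      have := congrArg List.length htail
      simp [List.length_drop] at this
      omega
    simp [PySem.List.enumerate, pvLoopA, pvLoopB, hpos, List.take_of_length_le hk]
  | cons line tl ih =>
    have hk : k < lines.length := by
      by_contra h
      rw [List.drop_eq_nil_of_le (by omega)] at htail
      simp at htail
    have hline : lines[k]? = some line := by
      calc lines[k]? = (lines.drop k)[0]? := by simp [List.getElem?_drop]
        _ = some line := by rw [← htail]; simp
    have htake : lines.take (k + 1) = lines.take k ++ [line] := by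
      rw [List.take_add_one, hline]
      rfl
    have hsum : pos + (line.length : Int) = pvSumLen (lines.take (k + 1)) := by
      rw [htake, pvSumLen_append, hpos, pvSumLen_cons]
      simp [pvSumLen]
    have htl : tl = lines.drop (k + 1) := by
      have := congrArg (List.drop 1) htail
      simpa [List.drop_drop, Nat.add_comm] using this
    have henum : PySem.List.enumerate (line :: tl) (k : Int)
        = ((k : Int), line) :: PySem.List.enumerate tl (((k + 1 : Nat) : Int)) := by
      simp [PySem.List.enumerate]
    rw [henum]
    by_cases h1 : (PySem.Chars.startswith (PySem.Chars.lstrip line) ['`','`','`']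
        || PySem.Chars.startswith (PySem.Chars.lstrip line) ['~','~','~']) = true
    · simp only [pvLoopA, pvLoopB, h1, if_pos]
      exact ih (k + 1) htl (!f) (pos + (line.length : Int)) hsum
    · cases f with
      | true =>
        simp only [pvLoopA, pvLoopB, h1, if_neg, Bool.false_eq_true, not_false_iff,
          if_pos, Bool.not_true, Bool.false_and]
        exact ih (k + 1) htl true (pos + (line.length : Int)) hsum
      | false =>
        by_cases h2 : PySem.Chars.startswith line ['#','#',' '] = true
        · simp only [pvLoopA, pvLoopB, h1, h2, Bool.false_eq_true, not_false_iff,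
            if_neg, if_pos, Bool.not_false, Bool.true_and]
          rw [PySem.List.slice_to lines (Int.natCast_nonneg k)]
          have := pvFoldl_add (lines.take ((k : Int).toNat)) 0
          rw [this, Int.toNat_natCast, hpos]
          ring
        · simp only [pvLoopA, pvLoopB, h1, h2, Bool.false_eq_true, not_false_iff,
            if_neg, Bool.not_false, Bool.true_and]
          exact ih (k + 1) htl false (pos + (line.length : Int)) hsum

-- ----- relating B's character scan to the line decomposition -----

-- first line (with keepend) and remaining characters, mirroring pvSplitKeepGo's split
def pvSplitFirst : List Char → List Char × List Char
  | [] => ([], [])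
  | '\r' :: '\n' :: r => (['\r', '\n'], r)
  | '\n' :: r => (['\n'], r)
  | '\r' :: r => (['\r'], r)
  | c :: r => ((c :: (pvSplitFirst r).1), (pvSplitFirst r).2)

theorem pvSplitFirst_append (s : List Char) :
    (pvSplitFirst s).1 ++ (pvSplitFirst s).2 = s := by
  fun_induction pvSplitFirst s <;> simp_all

theorem pvDropSucc (cs : List Char) (i : Nat) (c : Char) (r : List Char)
    (h : cs.drop i = c :: r) : cs.drop (i + 1) = r := by
  rw [← List.drop_drop, h]; rfl

theorem pvGetElemDrop (cs : List Char) (i : Nat) (c : Char) (r : List Char)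
    (h : cs.drop i = c :: r) (hi : i < cs.length) : cs[i] = c := by
  have := List.getElem_cons_drop hi
  rw [h] at this
  exact ((List.cons_eq_cons.mp this.symm).1).symm

theorem pvLenLeDropNil (cs : List Char) (i : Nat) (h : cs.drop i = ([] : List Char)) :
    cs.length ≤ i := by
  have := congrArg List.length h; simp at this; omega

theorem pvLtDropCons (cs : List Char) (i : Nat) (c : Char) (r : List Char)
    (h : cs.drop i = c :: r) : i < cs.length := by
  by_contra hge
  rw [List.drop_eq_nil_of_le (by omega)] at h
  simp at h

theorem pvSplitKeepGo_eq_first (s : List Char) : s ≠ [] → ∀ acc : List Char,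
    pvSplitKeepGo s acc = (acc.reverse ++ (pvSplitFirst s).1) :: pvSplitKeep (pvSplitFirst s).2 := by
  fun_induction pvSplitFirst s with
  | case1 => intro hs; simp at hs
  | case2 r => intro _ acc; simp [pvSplitKeepGo, pvSplitKeep]
  | case3 r => intro _ acc; simp [pvSplitKeepGo, pvSplitKeep]
  | case4 r h =>
    intro _ acc
    match r, h with
    | [], _ => simp [pvSplitKeepGo, pvSplitKeep]
    | a :: t, h => simp [pvSplitKeepGo, pvSplitKeep]
  | case5 c r h1 h2 h3 ih =>
    intro _ acc
    have step : pvSplitKeepGo (c :: r) acc = pvSplitKeepGo r (c :: acc) := by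
      cases r with
      | nil => simp [pvSplitKeepGo]
      | cons a t => simp [pvSplitKeepGo]
    rw [step]
    cases r with
    | nil => simp [pvSplitKeepGo, pvSplitKeep, pvSplitFirst]
    | cons a t =>
      rw [ih (by simp) (c :: acc)]
      simp

theorem pvSplitKeep_eq_first (s : List Char) (hs : s ≠ []) :
    pvSplitKeep s = (pvSplitFirst s).1 :: pvSplitKeep (pvSplitFirst s).2 := by
  simpa using pvSplitKeepGo_eq_first s hs []

-- structure of the first line: break-free content plus an optional trailing break
theorem pvSplitFirst_struct (s : List Char) (hs : s ≠ []) :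
    ∃ content br, (pvSplitFirst s).1 = content ++ br ∧
      (∀ c ∈ content, ¬(c = '\n' ∨ c = '\r')) ∧
      ((br = [] ∧ (pvSplitFirst s).2 = []) ∨ br = ['\n'] ∨ br = ['\r', '\n'] ∨
        (br = ['\r'] ∧ ∀ c, (pvSplitFirst s).2.head? = some c → c ≠ '\n')) := by
  fun_induction pvSplitFirst s with
  | case1 => simp at hs
  | case2 r => exact ⟨[], ['\r','\n'], by simp, by simp, by simp⟩
  | case3 r => exact ⟨[], ['\n'], by simp, by simp, by simp⟩
  | case4 r h =>
    refine ⟨[], ['\r'], by simp, by simp, ?_⟩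
    refine Or.inr (Or.inr (Or.inr ⟨rfl, ?_⟩))
    intro c hc e
    cases r with
    | nil => simp at hc
    | cons a t =>
      simp at hc
      exact h t (by rw [hc, e])
  | case5 c r h1 h2 h3 ih =>
    have h2' : c ≠ '\n' := fun e => h2 e
    have h3' : c ≠ '\r' := fun e => h3 e
    cases r with
    | nil => exact ⟨[c], [], by simp [pvSplitFirst], by simp [h2', h3'], by simp [pvSplitFirst]⟩
    | cons a t =>
      obtain ⟨content, br, e1, hc, hbr⟩ := ih (by simp)
      exact ⟨c :: content, br, by simp [e1], by simpa [h2', h3'] using fun a ha => hc a ha, hbr⟩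

theorem pvScanSkip_adv (s : List Char) : ∀ (cs : List Char) (i : Nat),
    cs.drop i = s → s ≠ [] →
    pvSkipBreak cs (pvScanToBreak cs i) = i + (pvSplitFirst s).1.length := by
  induction s with
  | nil => intro cs i _ hne; simp at hne
  | cons c r ih =>
    intro cs i hdrop _
    have hi : i < cs.length := pvLtDropCons cs i c r hdrop
    have hget : cs[i] = c := pvGetElemDrop cs i c r hdrop hi
    have hget? : cs[i]? = some c := by rw [List.getElem?_eq_getElem hi, hget]
    have hdrop1 : cs.drop (i + 1) = r := pvDropSucc cs i c r hdrop
    have hnext : cs[i + 1]? = r.head? := by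
      rw [← hdrop1]
      cases h : cs.drop (i + 1) with
      | nil => simp [List.getElem?_eq_none (pvLenLeDropNil cs (i + 1) h)]
      | cons a t =>
        rw [List.getElem?_eq_getElem (pvLtDropCons cs (i + 1) a t h),
          pvGetElemDrop cs (i + 1) a t h (pvLtDropCons cs (i + 1) a t h)]
        simp
    by_cases hbrk : c = '\n' ∨ c = '\r'
    · have hscan : pvScanToBreak cs i = i := by
        rw [pvScanToBreak, dif_pos hi, if_pos (by rw [hget]; exact hbrk)]
      rw [hscan]
      rcases hbrk with hc | hc
      · -- '\n' line
        rw [pvSkipBreak, if_pos hi, if_neg (by rw [hget?, hc]; simp)]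
        subst hc
        simp [pvSplitFirst]
      · -- '\r' line: look at the next character
        subst hc
        cases hr : r with
        | nil =>
          rw [pvSkipBreak, if_pos hi, if_neg (by rw [hnext, hr]; simp)]
          simp [pvSplitFirst]
        | cons a t =>
          by_cases ha : a = '\n'
          · subst ha
            rw [pvSkipBreak, if_pos hi, if_pos ⟨hget?, by rw [hnext, hr]; rfl⟩]
            simp [pvSplitFirst]
          · rw [pvSkipBreak, if_pos hi, if_neg (by rw [hnext, hr]; simp [ha])]
            simp [pvSplitFirst, ha]
    · push_neg at hbrk
      have hscan : pvScanToBreak cs i = pvScanToBreak cs (i + 1) := by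
        rw [pvScanToBreak, dif_pos hi, if_neg (by rw [hget]; simpa using hbrk)]
      have hsf : (pvSplitFirst (c :: r)).1 = c :: (pvSplitFirst r).1 := by
        cases r with
        | nil => simp [pvSplitFirst, hbrk.1, hbrk.2]
        | cons a t => simp [pvSplitFirst, hbrk.1, hbrk.2]
      rw [hscan, hsf]
      cases hr : r with
      | nil =>
        have hlen : cs.length = i + 1 := by
          have := pvLenLeDropNil cs (i + 1) (by rw [hdrop1, hr])
          omega
        have : pvScanToBreak cs (i + 1) = i + 1 := by
          rw [pvScanToBreak, dif_neg (by omega)]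
        rw [this, pvSkipBreak, if_neg (by omega)]
        simp [pvSplitFirst]
      | cons a t =>
        rw [← hr, ih cs (i + 1) hdrop1 (by rw [hr]; simp)]
        simp
        omega

theorem pvSkipWS_drop (s : List Char) : ∀ (cs : List Char) (i : Nat),
    cs.drop i = s →
    cs.drop (pvSkipWS cs i) = s.dropWhile (fun c => decide (c = ' ' ∨ c = '\t')) := by
  induction s with
  | nil =>
    intro cs i hdrop
    have hge := pvLenLeDropNil cs i hdrop
    rw [pvSkipWS, dif_neg (by omega)]
    simpa using hdrop
  | cons c r ih =>
    intro cs i hdrop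
    have hi : i < cs.length := pvLtDropCons cs i c r hdrop
    have hget : cs[i] = c := pvGetElemDrop cs i c r hdrop hi
    have hdrop1 : cs.drop (i + 1) = r := pvDropSucc cs i c r hdrop
    by_cases hws : c = ' ' ∨ c = '\t'
    · rw [pvSkipWS, dif_pos hi, if_pos (by rw [hget]; exact hws)]
      rw [ih cs (i + 1) hdrop1]
      simp [List.dropWhile_cons, hws]
    · rw [pvSkipWS, dif_pos hi, if_neg (by rw [hget]; exact hws)]
      rw [hdrop, List.dropWhile_cons, if_neg (by simpa using hws)]

-- startswith is insensitive to what follows a string containing a line break,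
-- for a break-free pattern
theorem pvStartswith_append (u v pat : List Char)
    (hu : ∃ c ∈ u, c = '\n' ∨ c = '\r')
    (hpat : ∀ c ∈ pat, ¬(c = '\n' ∨ c = '\r')) :
    PySem.Chars.startswith (u ++ v) pat = PySem.Chars.startswith u pat := by
  by_cases h : PySem.Chars.startswith u pat = true
  · rw [h, PySem.Chars.startswith_iff]
    exact (PySem.Chars.startswith_iff u pat |>.mp h).trans (List.prefix_append u v)
  · cases hb : PySem.Chars.startswith (u ++ v) pat with
    | false => simpa using h
    | true =>
      exfalso
      have hpre : pat <+: u ++ v := (PySem.Chars.startswith_iff _ _).mp hb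
      rcases List.prefix_or_prefix_of_prefix hpre (List.prefix_append u v) with h1 | h1
      · exact h ((PySem.Chars.startswith_iff u pat).mpr h1)
      · obtain ⟨b, hbu, hbrk⟩ := hu
        exact hpat b (h1.sublist.mem hbu) hbrk

theorem pvCharToNatInj (a b : Char) (h : a.toNat = b.toNat) : a = b := by
  have ha := Char.ofNat_toNat a
  have hb := Char.ofNat_toNat b
  rw [← ha, ← hb, h]

theorem pvWsDomBreak (c : Char) (hd : pvDomChar c = true) (hs : PySem.Chars.isspace c = true)
    (hst : ¬(c = ' ' ∨ c = '\t')) : c = '\n' ∨ c = '\r' := by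
  unfold pvDomChar at hd
  unfold PySem.Chars.isspace at hs
  simp at hd hs
  push_neg at hst
  have h32 : c.toNat ≠ 32 := fun e => hst.1 (pvCharToNatInj c ' ' (e.trans (by decide)))
  have h9 : c.toNat ≠ 9 := fun e => hst.2 (pvCharToNatInj c '\t' (e.trans (by decide)))
  have : c.toNat = 10 ∨ c.toNat = 13 := by omega
  rcases this with e | e
  · exact Or.inl (pvCharToNatInj c '\n' (e.trans (by decide)))
  · exact Or.inr (pvCharToNatInj c '\r' (e.trans (by decide)))

theorem pvDropWhileHead (p : Char → Bool) (l : List Char) (b : Char) (z : List Char)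
    (h : l.dropWhile p = b :: z) : p b = false := by
  induction l with
  | nil => simp at h
  | cons a t ih =>
    rw [List.dropWhile_cons] at h
    split at h
    · exact ih h
    · rename_i hpa
      cases h
      exact eq_false_of_ne_true hpa

theorem pvStartswithNilFalse (pat : List Char) (hpat : pat ≠ []) :
    PySem.Chars.startswith [] pat = false := by
  cases hb : PySem.Chars.startswith [] pat with
  | false => rfl
  | true =>
    have := (PySem.Chars.startswith_iff [] pat).mp hb
    exact absurd (List.prefix_nil.mp this) hpat

theorem pvStartswithHeadNe (x : Char) (xs pat : List Char) (hpat : pat ≠ [])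
    (h : ∀ p ∈ pat, p ≠ x) : PySem.Chars.startswith (x :: xs) pat = false := by
  cases pat with
  | nil => exact absurd rfl hpat
  | cons p ps =>
    cases hb : PySem.Chars.startswith (x :: xs) (p :: ps) with
    | false => rfl
    | true =>
      have := (PySem.Chars.startswith_iff _ _).mp hb
      rw [List.cons_prefix_cons] at this
      exact absurd this.1 (h p (by simp))

theorem pvDropWhileAllNil (p : Char → Bool) (l : List Char) (h : ∀ x ∈ l, p x = true) :
    l.dropWhile p = [] := by
  exact List.dropWhile_eq_nil_iff.mpr h

-- the fence test of B (skip spaces/tabs in place, test at k) equals A's lstrip-based test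
theorem pvFence_eq (line restcs pat : List Char)
    (hdom : ∀ c ∈ line, pvDomChar c = true)
    (hstruct : ∃ content br, line = content ++ br ∧
      (∀ c ∈ content, ¬(c = '\n' ∨ c = '\r')) ∧
      ((br = [] ∧ restcs = []) ∨ br = ['\n'] ∨ br = ['\r', '\n'] ∨ br = ['\r']))
    (hpat : pat ≠ [] ∧ ∀ c ∈ pat,
      PySem.Chars.isspace c = false ∧ ¬(c = ' ' ∨ c = '\t') ∧ ¬(c = '\n' ∨ c = '\r')) :
    PySem.Chars.startswith ((line ++ restcs).dropWhile (fun c => decide (c = ' ' ∨ c = '\t'))) pat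
      = PySem.Chars.startswith (PySem.Chars.lstrip line) pat := by
  obtain ⟨content, br, hline, hcontent, hbr⟩ := hstruct
  have hstw : ∀ x : Char, (x = ' ' ∨ x = '\t') → PySem.Chars.isspace x = true := by
    rintro x (rfl | rfl) <;> decide
  cases hz : line.dropWhile (fun c => decide (c = ' ' ∨ c = '\t')) with
  | nil =>
    have hall : ∀ x ∈ line, (x = ' ' ∨ x = '\t') := by
      intro x hx
      simpa using List.dropWhile_eq_nil_iff.mp hz x hx
    have hrest : restcs = [] := by
      rcases hbr with ⟨_, h⟩ | h | h | h
      · exact h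
      · exact absurd (hall '\n' (by rw [hline, h]; simp)) (by decide)
      · exact absurd (hall '\r' (by rw [hline, h]; simp)) (by decide)
      · exact absurd (hall '\r' (by rw [hline, h]; simp)) (by decide)
    subst hrest
    rw [List.append_nil, hz, pvStartswithNilFalse pat hpat.1]
    have : PySem.Chars.lstrip line = [] := by
      unfold PySem.Chars.lstrip
      exact pvDropWhileAllNil _ line (fun x hx => hstw x (hall x hx))
    rw [this, pvStartswithNilFalse pat hpat.1]
  | cons b z' =>
    have hdz : (line ++ restcs).dropWhile (fun c => decide (c = ' ' ∨ c = '\t'))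
        = b :: (z' ++ restcs) := by
      rw [List.dropWhile_append, hz]
      simp
    have hbst : ¬(b = ' ' ∨ b = '\t') := by
      simpa using pvDropWhileHead _ line b z' hz
    have hbmem : b ∈ line := by
      have hmem : b ∈ line.dropWhile (fun c => decide (c = ' ' ∨ c = '\t')) := by rw [hz]; simp
      exact (List.dropWhile_sublist _).mem hmem
    have hlsp : PySem.Chars.lstrip line = List.dropWhile PySem.Chars.isspace (b :: z') := by
      unfold PySem.Chars.lstrip
      conv_lhs => rw [← List.takeWhile_append_dropWhile
        (p := fun c => decide (c = ' ' ∨ c = '\t')) (l := line)]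
      rw [List.dropWhile_append, hz]
      rw [pvDropWhileAllNil _ _ (fun x hx => hstw x (by simpa using List.mem_takeWhile_imp hx))]
      simp
    rw [hdz]
    by_cases hbsp : PySem.Chars.isspace b = true
    · -- b is a line break: both tests fail
      have hbrk : b = '\n' ∨ b = '\r' := pvWsDomBreak b (hdom b hbmem) hbsp hbst
      have hpb : ∀ p ∈ pat, p ≠ b := by
        intro p hp e
        rcases hbrk with rfl | rfl <;> exact (hpat.2 p hp).2.2 (by rw [e]; simp)
      rw [pvStartswithHeadNe b (z' ++ restcs) pat hpat.1 hpb, hlsp]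
      rw [List.dropWhile_cons, if_pos hbsp]
      cases hz2 : z'.dropWhile PySem.Chars.isspace with
      | nil => rw [pvStartswithNilFalse pat hpat.1]
      | cons d d' =>
        -- d is again a character of line, past b; every char of z' is in br, a break
        exfalso
        -- z' consists of characters after the first break b, hence inside br
        have hzbr : b :: z' = List.dropWhile (fun c => decide (c = ' ' ∨ c = '\t')) br := by
          have hz3 := hz
          rw [hline, List.dropWhile_append] at hz3
          cases hdc : content.dropWhile (fun c => decide (c = ' ' ∨ c = '\t')) with
          | nil => rw [hdc] at hz3; simpa using hz3.symm
          | cons e e' =>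
            exfalso
            rw [hdc] at hz3
            simp at hz3
            have hemem : e ∈ content := by
              have hmem : e ∈ content.dropWhile (fun c => decide (c = ' ' ∨ c = '\t')) := by
                rw [hdc]; simp
              exact (List.dropWhile_sublist _).mem hmem
            exact hcontent e hemem (by rw [hz3.1]; exact hbrk)
        have hbrcase : br = ['\n'] ∨ br = ['\r', '\n'] ∨ br = ['\r'] := by
          rcases hbr with ⟨h, _⟩ | h | h | h
          · rw [h] at hzbr; simp at hzbr
          · exact Or.inl h
          · exact Or.inr (Or.inl h)
          · exact Or.inr (Or.inr h)
        have hnl : PySem.Chars.isspace '\n' = true := by decide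
        rcases hbrcase with h | h | h <;> rw [h] at hzbr <;> simp at hzbr <;>
          rw [hzbr.2] at hz2 <;> simp [List.dropWhile, hnl] at hz2
    · -- b is a real character: compare prefixes directly
      have hlsp2 : PySem.Chars.lstrip line = b :: z' := by
        rw [hlsp, List.dropWhile_cons, if_neg (by simpa using hbsp)]
      rw [hlsp2]
      by_cases hrest : restcs = []
      · subst hrest; rw [List.append_nil]
      · have hbrne : br ≠ [] := by
          rcases hbr with ⟨_, h⟩ | h | h | h
          · exact absurd h hrest
          all_goals simp [h]
        obtain ⟨e, hebr, hebrk⟩ : ∃ e ∈ br, e = '\n' ∨ e = '\r' := by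
          rcases hbr with ⟨h, _⟩ | h | h | h
          · exact absurd h hbrne
          · exact ⟨'\n', by simp [h], Or.inl rfl⟩
          · exact ⟨'\r', by simp [h], Or.inr rfl⟩
          · exact ⟨'\r', by simp [h], Or.inr rfl⟩
        have hez : e ∈ b :: z' := by
          have heline : e ∈ line := by rw [hline]; exact List.mem_append_right _ hebr
          conv at heline => rw [← List.takeWhile_append_dropWhile
            (p := fun c => decide (c = ' ' ∨ c = '\t')) (l := line)]
          rw [hz] at heline
          rcases List.mem_append.mp heline with hm | hm
          · exfalso
            have := List.mem_takeWhile_imp hm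
            rcases hebrk with rfl | rfl <;> simp at this
          · exact hm
        exact pvStartswith_append (b :: z') restcs pat ⟨e, hez, hebrk⟩
          (fun c hc => (hpat.2 c hc).2.2)

-- B's character loop equals the running-offset line loop on the suffix decomposition
theorem pvLoopChar_eq (n : Nat) : ∀ (cs : List Char) (i : Nat) (f : Bool),
    (∀ c ∈ cs, pvDomChar c = true) → i ≤ cs.length → cs.length - i ≤ n →
    pvLoopBChar cs i f = pvLoopB (pvSplitKeep (cs.drop i)) f (i : Int) := by
  induction n with
  | zero =>
    intro cs i f hdom hle hn
    have hi : i = cs.length := by omega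
    rw [pvLoopBChar, dif_neg (by omega), hi, List.drop_length]
    simp [pvSplitKeep, pvSplitKeepGo, pvLoopB]
  | succ n ih =>
    intro cs i f hdom hle hn
    by_cases hi : i < cs.length
    · have hs : cs.drop i ≠ [] := by
        intro e
        have := pvLenLeDropNil cs i e
        omega
      obtain ⟨content, br, hline, hcontent, hbr⟩ := pvSplitFirst_struct (cs.drop i) hs
      set line := (pvSplitFirst (cs.drop i)).1 with hlinedef
      set restcs := (pvSplitFirst (cs.drop i)).2 with hrestdef
      have hsk : pvSplitKeep (cs.drop i) = line :: pvSplitKeep restcs :=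
        pvSplitKeep_eq_first (cs.drop i) hs
      have happ : line ++ restcs = cs.drop i := pvSplitFirst_append (cs.drop i)
      have hadv : pvSkipBreak cs (pvScanToBreak cs i) = i + line.length :=
        pvScanSkip_adv (cs.drop i) cs i rfl hs
      have hdomline : ∀ c ∈ line, pvDomChar c = true := by
        intro c hc
        exact hdom c ((List.drop_sublist i cs).mem (happ ▸ List.mem_append_left restcs hc))
      have hstruct' : ∃ content br, line = content ++ br ∧
          (∀ c ∈ content, ¬(c = '\n' ∨ c = '\r')) ∧
          ((br = [] ∧ restcs = []) ∨ br = ['\n'] ∨ br = ['\r', '\n'] ∨ br = ['\r']) := by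
        refine ⟨content, br, hline, hcontent, ?_⟩
        rcases hbr with ⟨h1, h2⟩ | h | h | ⟨h, _⟩
        · exact Or.inl ⟨h1, h2⟩
        · exact Or.inr (Or.inl h)
        · exact Or.inr (Or.inr (Or.inl h))
        · exact Or.inr (Or.inr (Or.inr h))
      have hfence : ∀ pat : List Char, (pat ≠ [] ∧ ∀ c ∈ pat,
          PySem.Chars.isspace c = false ∧ ¬(c = ' ' ∨ c = '\t') ∧ ¬(c = '\n' ∨ c = '\r')) →
          pvStartsAt cs (pvSkipWS cs i) pat
            = PySem.Chars.startswith (PySem.Chars.lstrip line) pat := by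
        intro pat hp
        unfold pvStartsAt
        rw [pvSkipWS_drop (cs.drop i) cs i rfl, ← happ]
        exact pvFence_eq line restcs pat hdomline hstruct' hp
      have hf1 := hfence ['`','`','`'] ⟨by simp, by
        intro c hc
        fin_cases hc <;> exact ⟨by decide, by decide, by decide⟩⟩
      have hf2 := hfence ['~','~','~'] ⟨by simp, by
        intro c hc
        fin_cases hc <;> exact ⟨by decide, by decide, by decide⟩⟩
      have hsharp : pvStartsAt cs i ['#','#',' ']
          = PySem.Chars.startswith line ['#','#',' '] := by
        unfold pvStartsAt
        rw [← happ]
        by_cases hrest : restcs = []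
        · rw [hrest, List.append_nil]
        · have hbrne : br ≠ [] := by
            rcases hbr with ⟨_, h⟩ | h | h | ⟨h, _⟩
            · exact absurd h hrest
            all_goals simp [h]
          obtain ⟨e, hebr, hebrk⟩ : ∃ e ∈ br, e = '\n' ∨ e = '\r' := by
            rcases hbr with ⟨h, _⟩ | h | h | ⟨h, _⟩
            · exact absurd h hbrne
            · exact ⟨'\n', by simp [h], Or.inl rfl⟩
            · exact ⟨'\r', by simp [h], Or.inr rfl⟩
            · exact ⟨'\r', by simp [h], Or.inr rfl⟩
          exact pvStartswith_append line restcs _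
            ⟨e, by rw [hline]; exact List.mem_append_right content hebr, hebrk⟩ (by
              intro c hc
              fin_cases hc <;> decide)
      have hlpos : 0 < line.length := by
        have := pvNextLine_gt cs i hi
        omega
      have hdrop' : cs.drop (i + line.length) = restcs := by
        rw [← List.drop_drop, ← happ, List.drop_left]
      have hslen : line.length + restcs.length = cs.length - i := by
        have := congrArg List.length happ
        simp at this
        omega
      have hih : ∀ f' : Bool, pvLoopBChar cs (i + line.length) f'
          = pvLoopB (pvSplitKeep restcs) f' ((i : Int) + (line.length : Int)) := by
        intro f'
        have := ih cs (i + line.length) f' hdom (by omega) (by omega)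
        rw [hdrop'] at this
        rw [this]
        push_cast
        ring_nf
      rw [pvLoopBChar, dif_pos hi, hsk]
      simp only [hf1, hf2, hsharp, hadv]
      by_cases h1 : (PySem.Chars.startswith (PySem.Chars.lstrip line) ['`','`','`']
          || PySem.Chars.startswith (PySem.Chars.lstrip line) ['~','~','~']) = true
      · rw [if_pos h1]
        simp only [pvLoopB]
        rw [if_pos h1, hih (!f)]
      · rw [if_neg h1]
        simp only [pvLoopB]
        rw [if_neg h1]
        by_cases h2 : (!f && PySem.Chars.startswith line ['#','#',' ']) = true
        · rw [if_pos h2, if_pos h2]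
        · rw [if_neg h2, if_neg h2, hih f]
    · have hieq : i = cs.length := by omega
      rw [pvLoopBChar, dif_neg hi, hieq, List.drop_length]
      simp [pvSplitKeep, pvSplitKeepGo, pvLoopB]

-- ===== VERDICT (by name: the statement is the Claim_ definition above) =====
theorem leading_top_level_section_end_py_spec : Claim_equal_leading_top_level_section_end_py := by
  intro text hdom
  unfold Spec_leading_top_level_section_end_py leading_top_level_section_end_py
    leading_top_level_section_end_py_alt
  have hdom' : ∀ c ∈ text.toList, pvDomChar c = true := by
    unfold Dom_leading_top_level_section_end_py pvDomStr at hdom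
    exact fun c hc => List.all_eq_true.mp hdom c hc
  by_cases hne : text.toList = []
  · rw [hne]
    have h1 : pvScanToBreak ([] : List Char) 0 = 0 := by rw [pvScanToBreak]; simp
    have h2 : pvSkipBreak ([] : List Char) 0 = 0 := by rw [pvSkipBreak]; simp
    have h3 : pvLoopBChar ([] : List Char) 0 false = 0 := by rw [pvLoopBChar]; simp
    simp [pvSplitKeep, pvSplitKeepGo, h1, h2, h3]
  · have hsk := pvSplitKeep_eq_first text.toList hne
    have happ := pvSplitFirst_append text.toList
    have hlen1 : (pvSplitFirst text.toList).1.length ≤ text.toList.length := by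
      have h2 := congrArg List.length happ
      rw [List.length_append] at h2
      omega
    -- A's side: line list view
    have hflat : PySem.Str.len text
        = pvSumLen ((pvSplitFirst text.toList).1 :: pvSplitKeep (pvSplitFirst text.toList).2) := by
      rw [pvSumLen_eq_flatten, ← hsk, pvSplitKeep_flatten]
      simp [PySem.Str.len]
    have hslice : PySem.List.slice
        ((pvSplitFirst text.toList).1 :: pvSplitKeep (pvSplitFirst text.toList).2) (some 1) none
        = pvSplitKeep (pvSplitFirst text.toList).2 := by
      rw [PySem.List.slice_from _ (by norm_num)]
      simp
    have hA := pvLoop_eq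
      ((pvSplitFirst text.toList).1 :: pvSplitKeep (pvSplitFirst text.toList).2)
      (pvSplitKeep (pvSplitFirst text.toList).2) 1 (by simp) false
      (((pvSplitFirst text.toList).1.length : Int)) (by simp [pvSumLen])
    -- B's side: character view
    have hadv : pvSkipBreak text.toList (pvScanToBreak text.toList 0)
        = (pvSplitFirst text.toList).1.length := by
      have := pvScanSkip_adv text.toList text.toList 0 (by simp) hne
      simpa using this
    have hdropf : text.toList.drop (pvSplitFirst text.toList).1.length
        = (pvSplitFirst text.toList).2 := by
      have h0 : ((pvSplitFirst text.toList).1 ++ (pvSplitFirst text.toList).2).drop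
          (pvSplitFirst text.toList).1.length = (pvSplitFirst text.toList).2 := List.drop_left
      rw [happ] at h0
      exact h0
    have hB := pvLoopChar_eq text.toList.length text.toList
      ((pvSplitFirst text.toList).1.length) false hdom' hlen1 (by omega)
    rw [hdropf] at hB
    simp only [hsk, hadv, hB]
    rw [if_neg (by simp), hflat, hslice]
    exact_mod_cast hA
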